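-- pv_equiv track=rewrite | github.com/viadee/eric | eric_nlp.py | remove_trailings
-- ===== SOURCE A (Python) =====
-- def remove_trailings(sentence, word, case_sensitive=False):
--   words = []
--   trail = True #becomes false when first trailing word not equal to <word> is found
--   reversed = sentence.split()
--   reversed.reverse()
--   for w in reversed:
--     if case_sensitive:
--       if w == word:
--         if not trail:
--           words.append(w)
--       else:
--         words.append(w)
--         trail = False
--     else:
--       if w.lower() == word.lower():
--         if not trail:
--           words.append(w)
--       else:
--         words.append(w)
--         trail = False
--
--   words.reverse()
--   return " ".join(words)
-- ===== SOURCE B (Python) =====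
-- def remove_trailings(sentence, word, case_sensitive=False):
--     words = sentence.split()
--
--     def matches(w):
--         return w == word if case_sensitive else w.lower() == word.lower()
--
--     end = len(words)
--     while end > 0 and matches(words[end - 1]):
--         end -= 1
--     return " ".join(words[:end])
-- ===== Notes on version B (the rewrite author's own statement) =====
-- stated objective: simpler
-- what changed: Instead of reversing the word list and replaying it through a trail flag with an append accumulator plus a second reverse, B splits once, walks a cutoff index backward over the word list while the last word matches, and joins the slice words[:end].
import Mathlib
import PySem

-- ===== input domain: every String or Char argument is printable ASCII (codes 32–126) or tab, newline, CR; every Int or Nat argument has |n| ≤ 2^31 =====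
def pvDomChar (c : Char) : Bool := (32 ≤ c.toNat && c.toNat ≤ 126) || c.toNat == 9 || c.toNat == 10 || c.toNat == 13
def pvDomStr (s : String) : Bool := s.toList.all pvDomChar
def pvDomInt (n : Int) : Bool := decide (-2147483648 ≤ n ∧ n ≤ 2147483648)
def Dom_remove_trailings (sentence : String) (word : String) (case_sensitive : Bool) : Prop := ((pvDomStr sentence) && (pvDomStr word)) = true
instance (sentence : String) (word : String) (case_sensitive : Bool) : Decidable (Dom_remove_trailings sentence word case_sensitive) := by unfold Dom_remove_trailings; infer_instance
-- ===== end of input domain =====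

-- B replaces A's reverse + trail-flag append loop + second reverse with a backward
-- cutoff index over the split word list and a single join of the slice (simpler decomposition).


-- ===== PORT A =====
-- the loop body of A, literally: nested ifs in the Python order, state (words, trail)
def rtStepA (word : String) (case_sensitive : Bool) (acc : List String × Bool) (w : String) :
    List String × Bool :=
  let words := acc.1
  let trail := acc.2
  if case_sensitive then
    if w == word then
      if !trail then (words ++ [w], trail) else (words, trail)
    else (words ++ [w], false)
  else
    if PySem.Str.lower w == PySem.Str.lower word then
      if !trail then (words ++ [w], trail) else (words, trail)
    else (words ++ [w], false)

def remove_trailings (sentence : String) (word : String) (case_sensitive : Bool) : String :=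
  let reversed := (PySem.Str.split₀ sentence).reverse
  let st := reversed.foldl (rtStepA word case_sensitive) ([], true)
  PySem.Str.join " " st.1.reverse

-- ===== PORT B =====
-- Source B's matches closure
def rtMatches (word : String) (case_sensitive : Bool) (w : String) : Bool :=
  if case_sensitive then w == word else PySem.Str.lower w == PySem.Str.lower word

-- Source B's while loop: decrement `end` while the word before it matches
def rtCut (words : List String) (p : String → Bool) : Nat → Nat
  | 0 => 0
  | e + 1 => if p (words.getD e "") then rtCut words p e else e + 1

def remove_trailings_alt (sentence : String) (word : String) (case_sensitive : Bool) : String :=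
  let words := PySem.Str.split₀ sentence
  let e := rtCut words (rtMatches word case_sensitive) words.length
  PySem.Str.join " " (words.take e)

-- ===== PRECONDITION & SPEC =====
def Spec_remove_trailings (sentence : String) (word : String) (case_sensitive : Bool) (out : String) : Prop := out = remove_trailings_alt sentence word case_sensitive
instance (sentence : String) (word : String) (case_sensitive : Bool) (out : String) : Decidable (Spec_remove_trailings sentence word case_sensitive out) := by unfold Spec_remove_trailings; infer_instance

-- ===== CLAIM (what is proved, stated in full; the proofs are below) =====
def Claim_equal_remove_trailings : Prop := ∀ (sentence : String) (word : String) (case_sensitive : Bool), Dom_remove_trailings sentence word case_sensitive → Spec_remove_trailings sentence word case_sensitive (remove_trailings sentence word case_sensitive)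

-- ===== LEMMAS AND PROOFS =====

-- A's step equals the canonical "match / no-match" form
lemma rtStepA_eq (word : String) (cs : Bool) (acc : List String × Bool) (w : String) :
    rtStepA word cs acc w =
      if rtMatches word cs w then
        (if !acc.2 then (acc.1 ++ [w], acc.2) else (acc.1, acc.2))
      else (acc.1 ++ [w], false) := by
  cases cs <;> simp [rtStepA, rtMatches]

-- once trail is false everything is appended
lemma foldA_false (word : String) (cs : Bool) :
    ∀ (rs : List String) (acc : List String),
      rs.foldl (rtStepA word cs) (acc, false) = (acc ++ rs, false) := by
  intro rs
  induction rs with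
  | nil => simp
  | cons x rest ih =>
      intro acc
      rw [List.foldl_cons, rtStepA_eq]
      by_cases h : rtMatches word cs x = true <;> simp [h, ih]

-- the full fold from ([], true) drops the leading matches
lemma foldA_true (word : String) (cs : Bool) :
    ∀ (rs : List String),
      (rs.foldl (rtStepA word cs) ([], true)).1 =
        rs.dropWhile (rtMatches word cs) := by
  intro rs
  induction rs with
  | nil => simp
  | cons x rest ih =>
      rw [List.foldl_cons, rtStepA_eq]
      by_cases h : rtMatches word cs x = true
      · simp [h, ih]
      · simp [h, foldA_false]

lemma rtCut_le (words : List String) (p : String → Bool) : ∀ e, rtCut words p e ≤ e := by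
  intro e
  induction e with
  | zero => simp [rtCut]
  | succ n ih =>
      rw [rtCut]
      split
      · omega
      · omega

lemma rtCut_append (p : String → Bool) (ws : List String) (x : String) :
    ∀ e, e ≤ ws.length → rtCut (ws ++ [x]) p e = rtCut ws p e := by
  intro e
  induction e with
  | zero => simp [rtCut]
  | succ n ih =>
      intro h
      have hg : (ws ++ [x]).getD n "" = ws.getD n "" := by
        simp [List.getD_eq_getElem?_getD, List.getElem?_append_left (show n < ws.length by omega)]
      rw [rtCut, rtCut, hg, ih (by omega)]

-- B's cutoff slice equals "drop trailing matches"
lemma take_rtCut (p : String → Bool) :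
    ∀ ws : List String,
      ws.take (rtCut ws p ws.length) = (ws.reverse.dropWhile p).reverse := by
  intro ws
  induction ws using List.reverseRecOn with
  | nil => simp [rtCut]
  | append_singleton ws x ih =>
      have hlen : (ws ++ [x]).length = ws.length + 1 := by simp
      have hg : (ws ++ [x]).getD ws.length "" = x := by
        simp [List.getD_eq_getElem?_getD]
      rw [hlen, rtCut, hg]
      simp only [List.reverse_append, List.reverse_cons, List.reverse_nil, List.nil_append]
      by_cases h : p x = true
      · rw [if_pos h, rtCut_append p ws x ws.length (le_refl _),
          List.take_append_of_le_length (rtCut_le ws p ws.length), ih]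
        simp [h]
      · rw [if_neg h]
        simp [h]

-- ===== VERDICT (by name: the statement is the Claim_ definition above) =====
theorem remove_trailings_spec : Claim_equal_remove_trailings := by
  intro sentence word cs _
  unfold Spec_remove_trailings remove_trailings remove_trailings_alt
  simp only [foldA_true, take_rtCut]
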